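-- pv_equiv track=rewrite | github.com/plstory/DS2D | src/metrics/prompt_consistency.py | _compute_TP_FP_FN_lists
-- ===== SOURCE A (Python) =====
-- from copy import deepcopy
--
-- def _compute_TP_FP_FN_lists(predicted_L, real_L):
--     TP, FP, FN = [], [], []
--     real_L = deepcopy(real_L)
--     for i, pred in enumerate(predicted_L):
--         if pred in real_L:
--             TP.append(pred)
--             real_L.remove(pred)
--         else:
--             FP.append(pred)
--     FN = real_L
--     return TP, FP, FN
-- ===== SOURCE B (Python) =====
-- def _compute_TP_FP_FN_lists(predicted_L, real_L):
--     # One pass over each list using count dictionaries (O(n+m)) instead of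
--     # repeated 'in'/'remove' scans of real_L (O(n*m)).
--     remaining = {}
--     for x in real_L:
--         remaining[x] = remaining.get(x, 0) + 1
--     TP, FP = [], []
--     for pred in predicted_L:
--         if remaining.get(pred, 0) > 0:
--             remaining[pred] -= 1
--             TP.append(pred)
--         else:
--             FP.append(pred)
--     skip = {}
--     for t in TP:
--         skip[t] = skip.get(t, 0) + 1
--     FN = []
--     for x in real_L:
--         if skip.get(x, 0) > 0:
--             skip[x] -= 1
--         else:
--             FN.append(x)
--     return TP, FP, FN
-- ===== Notes on version B (the rewrite author's own statement) =====
-- stated objective: faster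
-- what changed: Replaces the per-prediction 'in'/'remove' scans of real_L with count dictionaries: one pass decrements a Counter of real_L to split TP/FP, and FN is rebuilt in one pass over real_L skipping the matched counts (Counter of TP).
import Mathlib
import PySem

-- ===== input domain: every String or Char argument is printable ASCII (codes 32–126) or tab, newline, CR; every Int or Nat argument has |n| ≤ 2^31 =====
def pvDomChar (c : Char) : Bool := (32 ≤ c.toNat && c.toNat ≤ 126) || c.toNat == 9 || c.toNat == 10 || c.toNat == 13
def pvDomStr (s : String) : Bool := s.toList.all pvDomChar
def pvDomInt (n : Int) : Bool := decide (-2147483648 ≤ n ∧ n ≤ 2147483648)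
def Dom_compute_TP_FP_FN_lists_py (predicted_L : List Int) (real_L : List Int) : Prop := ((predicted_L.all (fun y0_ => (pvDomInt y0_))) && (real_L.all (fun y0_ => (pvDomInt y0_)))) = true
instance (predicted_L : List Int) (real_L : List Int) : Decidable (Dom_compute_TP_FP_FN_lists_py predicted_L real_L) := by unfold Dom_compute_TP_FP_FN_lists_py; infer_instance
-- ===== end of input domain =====

-- B replaces A's per-prediction 'in'/'remove' scans with count dictionaries (one pass each); proved to return the same triple.

-- ===== PORT A =====
-- the loop over enumerate(predicted_L) (index i unused); `real_L.remove(pred)` under the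
-- membership guard is exactly List.erase (remove first occurrence of a present element)
def aLoop (preds : List Int) (tp fp rem : List Int) : List Int × List Int × List Int :=
  match preds with
  | [] => (tp, fp, rem)
  | p :: ps =>
    if p ∈ rem then aLoop ps (tp ++ [p]) fp (rem.erase p)
    else aLoop ps tp (fp ++ [p]) rem

def compute_TP_FP_FN_lists_py (predicted_L : List Int) (real_L : List Int) : List Int × List Int × List Int :=
  aLoop predicted_L [] [] real_L

-- ===== PORT B =====
-- remaining[x] = remaining.get(x, 0) + 1 loop (a hand-built counter)
def bCount (xs : List Int) : PySem.Dict Int Int :=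
  xs.foldl (fun d x => d.insert x (d.getD x 0 + 1)) PySem.Dict.empty

-- the TP/FP loop over predicted_L
def bMatch (preds : List Int) (tp fp : List Int) (remaining : PySem.Dict Int Int) : List Int × List Int :=
  match preds with
  | [] => (tp, fp)
  | p :: ps =>
    if remaining.getD p 0 > 0 then
      bMatch ps (tp ++ [p]) fp (remaining.insert p (remaining.getD p 0 - 1))
    else bMatch ps tp (fp ++ [p]) remaining

-- the FN loop over real_L
def bSkip (xs : List Int) (fn : List Int) (skip : PySem.Dict Int Int) : List Int :=
  match xs with
  | [] => fn
  | x :: xs' =>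
    if skip.getD x 0 > 0 then bSkip xs' fn (skip.insert x (skip.getD x 0 - 1))
    else bSkip xs' (fn ++ [x]) skip

def compute_TP_FP_FN_lists_py_alt (predicted_L : List Int) (real_L : List Int) : List Int × List Int × List Int :=
  let r := bMatch predicted_L [] [] (bCount real_L)
  (r.1, r.2, bSkip real_L [] (bCount r.1))

-- ===== PRECONDITION & SPEC =====
def Spec_compute_TP_FP_FN_lists_py (predicted_L : List Int) (real_L : List Int) (out : List Int × List Int × List Int) : Prop := out = compute_TP_FP_FN_lists_py_alt predicted_L real_L
instance (predicted_L : List Int) (real_L : List Int) (out : List Int × List Int × List Int) : Decidable (Spec_compute_TP_FP_FN_lists_py predicted_L real_L out) := by unfold Spec_compute_TP_FP_FN_lists_py; infer_instance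

-- ===== CLAIM (what is proved, stated in full; the proofs are below) =====
def Claim_equal_compute_TP_FP_FN_lists_py : Prop := ∀ (predicted_L : List Int) (real_L : List Int), Dom_compute_TP_FP_FN_lists_py predicted_L real_L → Spec_compute_TP_FP_FN_lists_py predicted_L real_L (compute_TP_FP_FN_lists_py predicted_L real_L)

-- ===== LEMMAS AND PROOFS =====

-- mathematical view of the FN skip pass: counts as a function
def skipF (xs : List Int) (s : Int → Int) : List Int :=
  match xs with
  | [] => []
  | x :: xs' =>
    if s x > 0 then skipF xs' (fun v => if v = x then s v - 1 else s v)
    else x :: skipF xs' s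

theorem skipF_zero (xs : List Int) : skipF xs (fun _ => 0) = xs := by
  induction xs with
  | nil => rfl
  | cons x xs ih => simp [skipF, ih]

theorem bCount_getD (xs : List Int) (v : Int) : (bCount xs).getD v 0 = (xs.count v : Int) := by
  simp [bCount, PySem.Dict.getD_foldl_insert_add_one, PySem.Dict.getD_empty]

theorem bSkip_eq (xs : List Int) (fn : List Int) (d : PySem.Dict Int Int) :
    bSkip xs fn d = fn ++ skipF xs (fun v => d.getD v 0) := by
  induction xs generalizing fn d with
  | nil => simp [bSkip, skipF]
  | cons x xs ih =>
    by_cases h : d.getD x 0 > 0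
    · have harg : (fun v => (d.insert x (d.getD x 0 - 1)).getD v 0)
          = (fun v => if v = x then (fun v => d.getD v 0) v - 1 else (fun v => d.getD v 0) v) := by
        funext v
        rw [PySem.Dict.getD_insert]
        by_cases hv : v = x
        · simp [hv]
        · simp [hv]
      rw [bSkip, if_pos h, skipF, if_pos h, ih, harg]
    · rw [bSkip, if_neg h, skipF, if_neg h, ih]
      simp

-- erasing a present element of the skipped list = bumping its skip count
theorem skipF_bump (xs : List Int) (s : Int → Int) (p : Int)
    (hnn : ∀ v, 0 ≤ s v) (hp : p ∈ skipF xs s) :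
    skipF xs (fun v => if v = p then s v + 1 else s v) = (skipF xs s).erase p := by
  induction xs generalizing s with
  | nil => simp [skipF] at hp
  | cons x xs ih =>
    by_cases h : s x > 0
    · have hx : (if x = p then s x + 1 else s x) > 0 := by
        have := hnn p
        by_cases hxp : x = p <;> simp [hxp] <;> omega
      rw [skipF, if_pos h] at hp
      conv_rhs => rw [skipF, if_pos h]
      rw [skipF, if_pos hx]
      have harg : (fun v => if v = x then (if v = p then s v + 1 else s v) - 1 else (if v = p then s v + 1 else s v))
          = (fun v => if v = p then (if v = x then s v - 1 else s v) + 1 else (if v = x then s v - 1 else s v)) := by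
        funext v
        by_cases h1 : v = x <;> by_cases h2 : v = p <;> by_cases h3 : x = p <;> simp [h1, h2, h3] <;> omega
      rw [harg]
      have hnn' : ∀ v, 0 ≤ (fun v => if v = x then s v - 1 else s v) v := by
        intro v
        by_cases h1 : v = x
        · simp [h1]; omega
        · simp [h1]; exact hnn v
      exact ih _ hnn' hp
    · have hx0 : s x = 0 := by have := hnn x; omega
      rw [skipF, if_neg h] at hp
      conv_rhs => rw [skipF, if_neg h]
      by_cases hxp : x = p
      · subst hxp
        rw [skipF]
        have hpos : (if x = x then s x + 1 else s x) > 0 := by simp; omega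
        rw [if_pos hpos]
        have harg : (fun v => if v = x then (if v = x then s v + 1 else s v) - 1 else (if v = x then s v + 1 else s v)) = s := by
          funext v
          by_cases h1 : v = x <;> simp [h1]
        rw [harg, List.erase_cons_head]
      · have hpm : p ∈ skipF xs s := by
          rcases List.mem_cons.mp hp with h1 | h1
          · exact absurd h1.symm hxp
          · exact h1
        rw [skipF]
        have hneg : ¬ (if x = p then s x + 1 else s x) > 0 := by rw [if_neg hxp]; omega
        rw [if_neg hneg, ih s hnn hpm, List.erase_cons_tail]
        simp [hxp]

theorem loop_lemma (preds : List Int) (tp fp rem real : List Int) (d : PySem.Dict Int Int)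
    (hd : ∀ v, d.getD v 0 = (rem.count v : Int))
    (hr : rem = skipF real (fun v => (tp.count v : Int))) :
    aLoop preds tp fp rem =
      ((bMatch preds tp fp d).1, (bMatch preds tp fp d).2,
        skipF real (fun v => (((bMatch preds tp fp d).1.count v : Int)))) := by
  induction preds generalizing tp fp rem d with
  | nil => simp [aLoop, bMatch, hr]
  | cons p ps ih =>
    have hmem : (p ∈ rem) ↔ d.getD p 0 > 0 := by
      rw [hd p]
      constructor
      · intro h; exact_mod_cast List.count_pos_iff.mpr h
      · intro h; exact List.count_pos_iff.mp (by exact_mod_cast h)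
    by_cases h : p ∈ rem
    · have hb : d.getD p 0 > 0 := hmem.mp h
      rw [aLoop, if_pos h, bMatch, if_pos hb]
      apply ih
      · intro v
        rw [PySem.Dict.getD_insert]
        by_cases hv : v = p
        · subst hv
          rw [if_pos rfl, hd v, List.count_erase_self]
          have : 0 < rem.count v := List.count_pos_iff.mpr h
          omega
        · rw [if_neg hv, hd v, List.count_erase_of_ne hv]
      · have harg : (fun v => (((tp ++ [p]).count v : Int)))
            = (fun v => if v = p then ((tp.count v : Int)) + 1 else ((tp.count v : Int))) := by
          funext v
          by_cases hv : v = p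
          · simp [List.count_append, hv]
          · simp [List.count_append, hv, Ne.symm hv]
        rw [harg, hr]
        rw [skipF_bump real _ p (fun v => Int.natCast_nonneg _) (hr ▸ h)]
    · have hb : ¬ d.getD p 0 > 0 := fun hc => h (hmem.mpr hc)
      rw [aLoop, if_neg h, bMatch, if_neg hb]
      exact ih tp (fp ++ [p]) rem d hd hr

-- ===== VERDICT (by name: the statement is the Claim_ definition above) =====
theorem compute_TP_FP_FN_lists_py_spec : Claim_equal_compute_TP_FP_FN_lists_py := by
  intro predicted_L real_L _
  unfold Spec_compute_TP_FP_FN_lists_py compute_TP_FP_FN_lists_py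
  show _ = ((bMatch predicted_L [] [] (bCount real_L)).1, (bMatch predicted_L [] [] (bCount real_L)).2,
      bSkip real_L [] (bCount (bMatch predicted_L [] [] (bCount real_L)).1))
  rw [loop_lemma predicted_L [] [] real_L real_L (bCount real_L)
    (fun v => bCount_getD real_L v)
    (by simp only [List.count_nil, Int.natCast_zero]; exact (skipF_zero real_L).symm)]
  rw [bSkip_eq, List.nil_append]
  have harg : (fun v => (bCount ((bMatch predicted_L [] [] (bCount real_L)).1)).getD v 0)
      = (fun v => ((((bMatch predicted_L [] [] (bCount real_L)).1).count v : Int))) :=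
    funext (fun v => bCount_getD _ v)
  rw [harg]
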